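-- pv_equiv track=rewrite | github.com/M-Gage-Plott42/QUBO_QA | prr_local_detuning_opt.py | _stage_label_curve
-- ===== SOURCE A (Python) =====
-- from typing import Any, Dict, List, Tuple
--
-- def _stage_label_curve(num_points: int, stage_eval_ranges: Dict[str, Dict[str, int]]) -> List[str]:
--     labels = ["unknown"] * int(num_points)
--     for stage_name in ("stage1", "stage2", "stage3"):
--         section = stage_eval_ranges.get(stage_name, {})
--         start = int(section.get("start", 0))
--         end = int(section.get("end", 0))
--         for idx in range(max(0, start), min(int(num_points), end)):
--             labels[idx] = stage_name
--     return labels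
-- ===== SOURCE B (Python) =====
-- def _stage_label_curve(num_points, stage_eval_ranges):
--     n = int(num_points)
--
--     def label_of(idx):
--         for name in ("stage3", "stage2", "stage1"):
--             section = stage_eval_ranges.get(name, {})
--             start = int(section.get("start", 0))
--             end = int(section.get("end", 0))
--             if max(0, start) <= idx < min(n, end):
--                 return name
--         return "unknown"
--
--     return [label_of(idx) for idx in range(n)]
-- ===== Notes on version B (the rewrite author's own statement) =====
-- stated objective: alternative
-- what changed: Flipped the loop nesting: instead of allocating an 'unknown' array and overwriting ranges stage by stage, B classifies each point once by checking the stages in reverse priority order and returning the first containing stage.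
import Mathlib
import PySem

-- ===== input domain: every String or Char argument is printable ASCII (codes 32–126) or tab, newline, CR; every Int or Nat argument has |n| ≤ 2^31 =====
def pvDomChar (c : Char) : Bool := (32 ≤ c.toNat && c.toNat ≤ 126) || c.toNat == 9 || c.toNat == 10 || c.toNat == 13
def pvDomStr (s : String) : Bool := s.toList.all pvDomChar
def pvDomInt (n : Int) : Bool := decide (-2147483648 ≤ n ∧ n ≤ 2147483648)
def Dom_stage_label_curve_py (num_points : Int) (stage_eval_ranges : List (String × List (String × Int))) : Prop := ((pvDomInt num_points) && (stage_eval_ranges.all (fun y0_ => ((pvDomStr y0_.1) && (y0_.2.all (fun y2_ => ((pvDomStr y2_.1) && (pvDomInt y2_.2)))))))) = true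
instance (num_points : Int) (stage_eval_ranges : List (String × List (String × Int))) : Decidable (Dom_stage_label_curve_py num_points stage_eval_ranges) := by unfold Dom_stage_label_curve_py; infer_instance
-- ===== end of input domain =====

-- B replaces A's stage-by-stage range overwriting with a per-point classification
-- (reverse-priority lookup per index); alternative decomposition, same result.

-- ===== PORT A =====
-- Literal port of A: allocate ["unknown"]*n, then for each stage overwrite labels[idx]
-- on the clamped range.
def stage_label_curve_py (num_points : Int) (stage_eval_ranges : List (String × List (String × Int))) : List String :=
  let labels := List.replicate num_points.toNat "unknown"
  ["stage1", "stage2", "stage3"].foldl (fun labels stage_name =>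
    let sec := ((PySem.Dict.mk stage_eval_ranges).get? stage_name).getD []
    let start := ((PySem.Dict.mk sec).get? "start").getD 0
    let e := ((PySem.Dict.mk sec).get? "end").getD 0
    (PySem.List.pyRange (max 0 start) (min num_points e) 1).foldl
      (fun l idx => PySem.List.pySetD l idx stage_name) labels) labels

-- ===== PORT B =====
-- helper of B: is idx inside the clamped range of the named stage?
def pvInStage (num_points : Int) (stage_eval_ranges : List (String × List (String × Int))) (name : String) (idx : Int) : Bool :=
  let sec := ((PySem.Dict.mk stage_eval_ranges).get? name).getD []
  let start := ((PySem.Dict.mk sec).get? "start").getD 0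
  let e := ((PySem.Dict.mk sec).get? "end").getD 0
  decide (max 0 start ≤ idx ∧ idx < min num_points e)

-- helper of B: label of one point — first containing stage in reverse priority order
def pvLabelOf (num_points : Int) (stage_eval_ranges : List (String × List (String × Int))) (idx : Int) : String :=
  match ["stage3", "stage2", "stage1"].find? (fun name => pvInStage num_points stage_eval_ranges name idx) with
  | some name => name
  | none => "unknown"

def stage_label_curve_py_alt (num_points : Int) (stage_eval_ranges : List (String × List (String × Int))) : List String :=
  (PySem.List.pyRange 0 num_points 1).map (pvLabelOf num_points stage_eval_ranges)

-- ===== PRECONDITION & SPEC =====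
def Spec_stage_label_curve_py (num_points : Int) (stage_eval_ranges : List (String × List (String × Int))) (out : List String) : Prop := out = stage_label_curve_py_alt num_points stage_eval_ranges
instance (num_points : Int) (stage_eval_ranges : List (String × List (String × Int))) (out : List String) : Decidable (Spec_stage_label_curve_py num_points stage_eval_ranges out) := by unfold Spec_stage_label_curve_py; infer_instance

-- ===== CLAIM (what is proved, stated in full; the proofs are below) =====
def Claim_equal_stage_label_curve_py : Prop := ∀ (num_points : Int) (stage_eval_ranges : List (String × List (String × Int))), Dom_stage_label_curve_py num_points stage_eval_ranges → Spec_stage_label_curve_py num_points stage_eval_ranges (stage_label_curve_py num_points stage_eval_ranges)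

-- ===== LEMMAS AND PROOFS =====

-- filling a range with pySetD preserves length
lemma pv_foldl_pySetD_length (name : String) : ∀ (xs : List Int) (l : List String),
    (xs.foldl (fun l idx => PySem.List.pySetD l idx name) l).length = l.length := by
  intro xs
  induction xs with
  | nil => intro l; rfl
  | cons x xs ih =>
    intro l
    simp [List.foldl, ih, PySem.List.length_pySetD]

-- A's inner loop: fill labels[idx] = name on range(s, e); elementwise characterization
lemma pv_fill_spec (name : String) (e : Int) :
    ∀ (m : Nat) (s : Int) (labels : List String), (e - s).toNat = m → 0 ≤ s →
      e ≤ (labels.length : Int) →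
      ∀ (i : Nat),
        ((PySem.List.pyRange s e 1).foldl (fun l idx => PySem.List.pySetD l idx name) labels)[i]? =
          if s ≤ (i : Int) ∧ (i : Int) < e then some name else labels[i]? := by
  intro m
  induction m with
  | zero =>
    intro s labels hm hs he i
    have hse : e ≤ s := by omega
    rw [PySem.List.pyRange_one_eq_nil hse]
    simp only [List.foldl]
    split_ifs with h
    · omega
    · rfl
  | succ m ih =>
    intro s labels hm hs he i
    have hlt : s < e := by omega
    rw [PySem.List.pyRange_one_cons hlt]
    simp only [List.foldl]
    rw [PySem.List.pySetD_of_nonneg labels name hs]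
    rw [ih (s + 1) _ (by omega) (by omega) (by simp [he])]
    rw [List.getElem?_set]
    split_ifs with h1 h2 h3 h4 h5 <;> try rfl
    all_goals omega

-- B's per-point label written as nested ifs
lemma pv_labelOf_eq (n : Int) (d : List (String × List (String × Int))) (i : Int) :
    pvLabelOf n d i =
      if pvInStage n d "stage3" i then "stage3"
      else if pvInStage n d "stage2" i then "stage2"
      else if pvInStage n d "stage1" i then "stage1"
      else "unknown" := by
  unfold pvLabelOf
  cases h3 : pvInStage n d "stage3" i <;> cases h2 : pvInStage n d "stage2" i <;>
    cases h1 : pvInStage n d "stage1" i <;> simp [List.find?, h1, h2, h3]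

-- ===== VERDICT (by name: the statement is the Claim_ definition above) =====
theorem stage_label_curve_py_spec : Claim_equal_stage_label_curve_py := by
  intro n d _
  show _ = _
  unfold stage_label_curve_py stage_label_curve_py_alt
  simp only [List.foldl]
  -- names for sections
  apply List.ext_getElem?
  intro i
  by_cases hi : i < n.toNat
  · have hn : 0 < n := by omega
    have hnn : (n.toNat : Int) = n := Int.toNat_of_nonneg (by omega)
    have hlen0 : (List.replicate n.toNat "unknown").length = n.toNat := by simp
    -- lengths after each fill
    have hlen1 := pv_foldl_pySetD_length "stage1"
    have hlen2 := pv_foldl_pySetD_length "stage2"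
    -- rewrite A-side, outermost fill first
    rw [pv_fill_spec "stage3" _ _ _ _ rfl (le_max_left _ _)
        (by rw [hlen2, hlen1, hlen0, hnn]; exact min_le_left _ _)]
    rw [pv_fill_spec "stage2" _ _ _ _ rfl (le_max_left _ _)
        (by rw [hlen1, hlen0, hnn]; exact min_le_left _ _)]
    rw [pv_fill_spec "stage1" _ _ _ _ rfl (le_max_left _ _)
        (by rw [hlen0, hnn]; exact min_le_left _ _)]
    -- B side
    have hB : ((PySem.List.pyRange 0 n 1).map (pvLabelOf n d))[i]? =
        some (pvLabelOf n d i) := by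
      rw [List.getElem?_map, PySem.List.getElem?_pyRange_one]
      have h1 : (i : Int) < n := by omega
      simp [h1]
    rw [hB, pv_labelOf_eq]
    simp only [pvInStage, decide_eq_true_eq]
    split_ifs <;> first | rfl | simp [hi]
  · rw [List.getElem?_eq_none, List.getElem?_eq_none]
    · simp only [List.length_map, PySem.List.length_pyRange_one]; omega
    · rw [pv_foldl_pySetD_length, pv_foldl_pySetD_length, pv_foldl_pySetD_length]
      simp only [List.length_replicate]; omega
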